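-- pv_equiv track=rewrite | github.com/lirmag/All-works | ege_jan_6var/22.py | f
-- ===== SOURCE A (Python) =====
-- def f(x):
--     L = 0
--     M = 0
--     while x > 0:
--         M = M + 1
--         if x % 2 == 0:
--             L = L + 1
--         x = x // 2
--     return L,M
-- ===== SOURCE B (Python) =====
-- def f(x):
--     if x <= 0:
--         return (0, 0)
--     M = x.bit_length()
--     return (M - x.bit_count(), M)
-- ===== Notes on version B (the rewrite author's own statement) =====
-- stated objective: idiomatic
-- what changed: Replaces the per-bit division loop by the integer bit API: M = x.bit_length(), zeros = M - x.bit_count().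
import Mathlib
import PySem

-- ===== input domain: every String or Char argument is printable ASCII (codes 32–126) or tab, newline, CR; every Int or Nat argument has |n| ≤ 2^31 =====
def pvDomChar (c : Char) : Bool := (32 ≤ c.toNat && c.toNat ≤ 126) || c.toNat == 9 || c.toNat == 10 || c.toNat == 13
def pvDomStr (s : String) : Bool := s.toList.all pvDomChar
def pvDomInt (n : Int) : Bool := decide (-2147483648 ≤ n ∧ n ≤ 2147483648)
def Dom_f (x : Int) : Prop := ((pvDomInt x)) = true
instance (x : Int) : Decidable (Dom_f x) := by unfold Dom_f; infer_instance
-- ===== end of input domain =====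

-- B replaces A's per-bit division loop by the bit_length/bit_count primitives (more idiomatic; return value only).

-- ===== PORT A =====
def fLoop (x L M : Int) : Int × Int :=
  if _h : x > 0 then
    fLoop (PySem.Int.floordiv x 2) (if PySem.Int.mod x 2 = 0 then L + 1 else L) (M + 1)
  else (L, M)
termination_by x.toNat
decreasing_by
  rw [PySem.Int.floordiv_eq_ediv_of_pos (by omega : (0:Int) < 2)]
  omega

def f (x : Int) : Int × Int := fLoop x 0 0

-- ===== PORT B =====
def f_alt (x : Int) : Int × Int :=
  if x ≤ 0 then (0, 0)
  else
    let M : Int := PySem.Int.bitLength x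
    (M - (PySem.Int.bitCount x : Int), M)

-- ===== PRECONDITION & SPEC =====
def Spec_f (x : Int) (out : Int × Int) : Prop := out = f_alt x
instance (x : Int) (out : Int × Int) : Decidable (Spec_f x out) := by unfold Spec_f; infer_instance

-- ===== CLAIM (what is proved, stated in full; the proofs are below) =====
def Claim_equal_f : Prop := ∀ (x : Int), Dom_f x → Spec_f x (f x)

-- ===== LEMMAS AND PROOFS =====
lemma fLoop_eq (n : Nat) : ∀ L M : Int,
    fLoop (n : Int) L M =
      (L + (PySem.Int.bitLength (n : Int) : Int) - (PySem.Int.bitCount (n : Int) : Int),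
       M + (PySem.Int.bitLength (n : Int) : Int)) := by
  induction n using Nat.strong_induction_on with
  | _ n ih =>
    intro L M
    rcases Nat.eq_zero_or_pos n with h0 | hp
    · subst h0
      rw [fLoop]
      simp [PySem.Int.bitLength_zero, PySem.Int.bitCount_zero]
    · rw [fLoop]
      have hx : ((n : Int) > 0) := by exact_mod_cast hp
      rw [dif_pos hx]
      have hfd : PySem.Int.floordiv (n : Int) 2 = ((n / 2 : Nat) : Int) := by
        exact_mod_cast PySem.Int.floordiv_natCast n 2
      have hmd : PySem.Int.mod (n : Int) 2 = ((n % 2 : Nat) : Int) := by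
        exact_mod_cast PySem.Int.mod_natCast n 2
      rw [hfd, hmd]
      rw [ih (n / 2) (Nat.div_lt_self hp (by omega))]
      rw [PySem.Int.bitLength_natCast hp, PySem.Int.bitCount_natCast hp]
      rcases Nat.even_or_odd n with he | ho
      · have h2 : n % 2 = 0 := Nat.even_iff.mp he
        rw [h2]
        simp only [Nat.cast_zero, if_pos rfl, Prod.mk.injEq]
        constructor <;> push_cast <;> ring
      · have h2 : n % 2 = 1 := Nat.odd_iff.mp ho
        rw [h2]
        rw [if_neg (by decide : ¬ ((1 : Nat) : Int) = 0)]
        simp only [Prod.mk.injEq]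
        constructor <;> push_cast <;> ring

-- ===== VERDICT (by name: the statement is the Claim_ definition above) =====
theorem f_spec : Claim_equal_f := by
  intro x _
  unfold Spec_f f f_alt
  rcases le_or_gt x 0 with hle | hpos
  · rw [fLoop, dif_neg (by omega), if_pos hle]
  · rw [if_neg (by omega)]
    have hx : x = ((x.toNat : Nat) : Int) := by omega
    rw [hx, fLoop_eq x.toNat 0 0]
    simp
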